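-- pv_equiv track=rewrite | github.com/IDGS-1004-20001603/IDGS804-Flask2 | controllers/table.py | getColorByNumber
-- ===== SOURCE A (Python) =====
-- def getColorByNumber(number):
--     setColor = ''
--     colors = ['Negro', 'Café', 'Rojo', 'Naranja', 'Amarillo',
--               'Verde', 'Azul', 'Violeta', 'Gris', 'Blanco']
--
--     for index in range(len(colors)):
--         if (int(number) == index):
--             setColor = colors[index]
--             break
--
--     return setColor
-- ===== SOURCE B (Python) =====
-- def getColorByNumber(number):
--     colors = ['Negro', 'Café', 'Rojo', 'Naranja', 'Amarillo',
--               'Verde', 'Azul', 'Violeta', 'Gris', 'Blanco']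
--     n = int(number)
--     return colors[n] if 0 <= n < len(colors) else ''
-- ===== Notes on version B (the rewrite author's own statement) =====
-- stated objective: simpler
-- what changed: Replaces the scan-over-all-indices loop with break by a single bounds check and direct list index; out-of-range (including negative) falls through to ''.
import Mathlib
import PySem

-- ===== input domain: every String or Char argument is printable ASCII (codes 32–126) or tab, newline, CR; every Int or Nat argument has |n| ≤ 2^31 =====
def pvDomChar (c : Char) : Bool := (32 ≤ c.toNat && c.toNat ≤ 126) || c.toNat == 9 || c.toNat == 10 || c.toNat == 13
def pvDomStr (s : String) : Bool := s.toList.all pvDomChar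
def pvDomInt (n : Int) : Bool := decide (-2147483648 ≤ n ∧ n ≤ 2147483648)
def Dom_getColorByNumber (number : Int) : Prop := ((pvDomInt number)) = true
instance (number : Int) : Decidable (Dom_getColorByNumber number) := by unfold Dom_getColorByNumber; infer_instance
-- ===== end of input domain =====

-- B replaces A's scan-with-break over all indices by one bounds-checked direct index; same return value everywhere.

-- ===== PORT A =====
def pvColors : List String :=
  ["Negro", "Café", "Rojo", "Naranja", "Amarillo",
   "Verde", "Azul", "Violeta", "Gris", "Blanco"]

-- the for-loop with break: walk the index list, stop at the first match
def pvLoopA (number : Int) : List Int → String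
  | [] => ""
  | i :: rest =>
    if number == i then PySem.List.pyGetD pvColors i ""
    else pvLoopA number rest

def getColorByNumber (number : Int) : String :=
  pvLoopA number (PySem.List.pyRange 0 (Int.ofNat pvColors.length) 1)

-- ===== PORT B =====
def getColorByNumber_alt (number : Int) : String :=
  if 0 ≤ number ∧ number < Int.ofNat pvColors.length then
    PySem.List.pyGetD pvColors number ""
  else ""

-- ===== PRECONDITION & SPEC =====
def Spec_getColorByNumber (number : Int) (out : String) : Prop := out = getColorByNumber_alt number
instance (number : Int) (out : String) : Decidable (Spec_getColorByNumber number out) := by unfold Spec_getColorByNumber; infer_instance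

-- ===== CLAIM (what is proved, stated in full; the proofs are below) =====
def Claim_equal_getColorByNumber : Prop := ∀ (number : Int), Dom_getColorByNumber number → Spec_getColorByNumber number (getColorByNumber number)

-- ===== LEMMAS AND PROOFS =====

-- out of range the scan never matches and returns the initial ''
theorem pvLoopA_out (number : Int) (h : ¬ (0 ≤ number ∧ number < 10)) :
    getColorByNumber number = "" := by
  have : PySem.List.pyRange 0 (Int.ofNat pvColors.length) 1
      = [0, 1, 2, 3, 4, 5, 6, 7, 8, 9] := by decide
  simp only [getColorByNumber, this, pvLoopA]
  split_ifs with h0 h1 h2 h3 h4 h5 h6 h7 h8 h9 <;> simp_all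

-- ===== VERDICT (by name: the statement is the Claim_ definition above) =====
theorem getColorByNumber_spec : Claim_equal_getColorByNumber := by
  intro n _
  unfold Spec_getColorByNumber
  by_cases h : 0 ≤ n ∧ n < 10
  · obtain ⟨h0, h1⟩ := h
    interval_cases n <;> decide
  · rw [pvLoopA_out n h]
    simp only [getColorByNumber_alt, pvColors]
    rw [if_neg]
    simpa using h
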